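-- pv_equiv track=rewrite | github.com/sgurivir/HindSight | hindsight/diff_analyzers/base_diff_analyzer.py | _is_file_in_excluded_directory
-- ===== SOURCE A (Python) =====
-- from typing import Optional, List, TYPE_CHECKING
--
-- def _is_file_in_excluded_directory(file_path: str, exclude_patterns: List[str]) -> bool:
--     """
--     Check if a file is in an excluded directory.
--     Supports both directory names and relative paths.
--
--     Args:
--         file_path: Normalized file path
--         exclude_patterns: List of exclude patterns (directory names or relative paths)
--
--     Returns:
--         bool: True if file should be excluded, False otherwise
--     """
--     # Get the directory path of the file
--     file_dir = '/'.join(file_path.split('/')[:-1]) if '/' in file_path else ''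
--
--     for exclude_pattern in exclude_patterns:
--         # Case 1: Direct match with relative path (e.g., "Daemon/Shared")
--         if file_dir == exclude_pattern or file_dir.startswith(exclude_pattern + '/'):
--             return True
--
--         # Case 2: Directory name matches (legacy behavior)
--         # Split the file path and check if any directory component matches
--         path_parts = file_path.split('/')[:-1]  # Exclude the filename itself
--         for part in path_parts:
--             if part.lower() == exclude_pattern.lower():
--                 return True
--
--     return False
-- ===== SOURCE B (Python) =====
-- def _is_file_in_excluded_directory(file_path, exclude_patterns):
--     # Index the path once instead of scanning it per pattern: collect every
--     # '/'-boundary prefix of the file's directory (each ancestor directory and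
--     # the directory itself) in one set and the lowercased directory components
--     # in another; each pattern then needs only two membership probes, so the
--     # per-pattern startswith/ == comparisons and the inner component scan of A
--     # disappear entirely.
--     parts = file_path.split('/')[:-1]
--     file_dir = '/'.join(parts)
--     excludable = {file_dir}
--     for k in range(len(parts)):
--         excludable.add('/'.join(parts[:k + 1]))
--     lowered = {part.lower() for part in parts}
--     return any(p in excludable or p.lower() in lowered for p in exclude_patterns)
-- ===== Notes on version B (the rewrite author's own statement) =====
-- stated objective: faster
-- what changed: A scans per pattern (a prefix comparison plus a freshly recomputed component-list scan); B inverts the data flow: it indexes the path once into a set of '/'-boundary directory prefixes and a set of lowercased components, then answers each pattern with two O(1) membership probes, eliminating all per-pattern string scanning.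
import Mathlib
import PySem

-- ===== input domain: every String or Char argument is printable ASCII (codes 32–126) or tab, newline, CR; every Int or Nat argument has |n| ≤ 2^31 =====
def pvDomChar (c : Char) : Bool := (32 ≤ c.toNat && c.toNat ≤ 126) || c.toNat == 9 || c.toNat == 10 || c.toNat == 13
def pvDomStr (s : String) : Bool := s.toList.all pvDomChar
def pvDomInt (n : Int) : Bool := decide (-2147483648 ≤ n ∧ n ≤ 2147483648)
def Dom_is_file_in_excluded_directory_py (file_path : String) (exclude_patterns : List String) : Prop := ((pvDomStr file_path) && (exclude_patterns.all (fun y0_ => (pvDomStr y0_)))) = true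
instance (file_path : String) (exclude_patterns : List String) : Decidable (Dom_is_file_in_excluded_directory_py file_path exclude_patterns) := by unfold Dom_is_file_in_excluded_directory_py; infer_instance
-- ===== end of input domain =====

-- B indexes the path once (a set of '/'-boundary prefixes of the directory plus a lowercased
-- component set) and answers each pattern with two membership probes, replacing A's per-pattern
-- prefix comparisons and inner component scan; return value only, no side effects.


-- ===== PORT A =====
-- the 'for exclude_pattern in exclude_patterns' loop with its early returns
def pvA_loop (file_path : List Char) (file_dir : List Char) : List (List Char) → Bool
  | [] => false
  | p :: rest =>
    if file_dir == p || PySem.Chars.startswith file_dir (p ++ ['/']) then true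
    else
      -- path_parts = file_path.split('/')[:-1], recomputed each iteration as A does
      let path_parts := PySem.List.slice (PySem.Chars.splitOn file_path ['/']) none (some (-1))
      if path_parts.any (fun part => PySem.Chars.lower part == PySem.Chars.lower p) then true
      else pvA_loop file_path file_dir rest

def is_file_in_excluded_directory_py (file_path : String) (exclude_patterns : List String) : Bool :=
  let fp := file_path.toList
  -- file_dir = '/'.join(file_path.split('/')[:-1]) if '/' in file_path else ''
  let file_dir :=
    if PySem.Chars.isIn ['/'] fp then
      PySem.Chars.join ['/'] (PySem.List.slice (PySem.Chars.splitOn fp ['/']) none (some (-1)))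
    else []
  pvA_loop fp file_dir (exclude_patterns.map String.toList)

-- ===== PORT B =====
def is_file_in_excluded_directory_py_alt (file_path : String) (exclude_patterns : List String) : Bool :=
  let parts := PySem.List.slice (PySem.Chars.splitOn file_path.toList ['/']) none (some (-1))
  let file_dir := PySem.Chars.join ['/'] parts
  -- excludable = {file_dir}; for k in range(len(parts)): excludable.add('/'.join(parts[:k+1]))
  let excludable := (List.range parts.length).foldl
      (fun s k => PySem.Set.add s (PySem.Chars.join ['/'] (parts.take (k + 1))))
      (PySem.Set.ofList [file_dir])
  let lowered := PySem.Set.ofList (parts.map PySem.Chars.lower)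
  exclude_patterns.any (fun p =>
    PySem.Set.contains excludable p.toList || PySem.Set.contains lowered (PySem.Chars.lower p.toList))

-- ===== PRECONDITION & SPEC =====
def Spec_is_file_in_excluded_directory_py (file_path : String) (exclude_patterns : List String) (out : Bool) : Prop := out = is_file_in_excluded_directory_py_alt file_path exclude_patterns
instance (file_path : String) (exclude_patterns : List String) (out : Bool) : Decidable (Spec_is_file_in_excluded_directory_py file_path exclude_patterns out) := by unfold Spec_is_file_in_excluded_directory_py; infer_instance

-- ===== CLAIM =====
def Claim_equal_is_file_in_excluded_directory_py : Prop := ∀ (file_path : String) (exclude_patterns : List String), Dom_is_file_in_excluded_directory_py file_path exclude_patterns → Spec_is_file_in_excluded_directory_py file_path exclude_patterns (is_file_in_excluded_directory_py file_path exclude_patterns)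

-- ===== LEMMAS AND PROOFS =====

-- splitting on a separator that does not occur returns the whole string
theorem pv_splitOn_go_no_slash (fuel : Nat) (l cur : List Char) (acc : List (List Char))
    (h : '/' ∉ l) :
    PySem.Chars.splitOn.go ['/'] fuel l cur acc = ((cur.reverse ++ l) :: acc).reverse := by
  induction fuel generalizing l cur acc with
  | zero => rw [PySem.Chars.splitOn.go]
  | succ fuel ih =>
    cases l with
    | nil => rw [PySem.Chars.splitOn.go]; simp; omega
    | cons c rest =>
      rw [PySem.Chars.splitOn.go]
      have hc : c ≠ '/' := fun hc => h (hc ▸ List.mem_cons_self)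
      have hpre : List.isPrefixOf ['/'] (c :: rest) = false := by
        simp [List.isPrefixOf]; exact fun hc' => absurd hc'.symm hc
      rw [hpre]
      simp only [Bool.false_eq_true, if_false]
      rw [ih rest (c :: cur) acc (fun hm => h (List.mem_cons_of_mem _ hm))]
      simp

theorem pv_splitOn_no_slash (fp : List Char) (h : '/' ∉ fp) :
    PySem.Chars.splitOn fp ['/'] = [fp] := by
  unfold PySem.Chars.splitOn
  rw [pv_splitOn_go_no_slash _ _ _ _ h]
  simp

-- A's conditional file_dir equals B's unconditional join
theorem pv_file_dir_eq (fp : List Char) :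
    (if PySem.Chars.isIn ['/'] fp then
       PySem.Chars.join ['/'] (PySem.List.slice (PySem.Chars.splitOn fp ['/']) none (some (-1)))
     else []) =
    PySem.Chars.join ['/'] (PySem.List.slice (PySem.Chars.splitOn fp ['/']) none (some (-1))) := by
  cases h : PySem.Chars.isIn ['/'] fp with
  | true => simp
  | false =>
    have hns : '/' ∉ fp := by
      have := (PySem.Chars.isIn_eq_false_iff ['/'] fp).mp h
      exact fun hm => this ((List.singleton_infix_iff '/' fp).mpr hm)
    simp [pv_splitOn_no_slash fp hns, PySem.List.slice_to_neg_one, PySem.Chars.join_nil]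

-- every component produced by split('/') is free of '/'
theorem pv_go_no_slash (fuel : Nat) (l cur : List Char) (acc : List (List Char))
    (hf : l.length < fuel) (hcur : '/' ∉ cur) (hacc : ∀ x ∈ acc, '/' ∉ x) :
    ∀ x ∈ PySem.Chars.splitOn.go ['/'] fuel l cur acc, '/' ∉ x := by
  induction fuel generalizing l cur acc with
  | zero => omega
  | succ fuel ih =>
    cases l with
    | nil =>
      rw [PySem.Chars.splitOn.go]
      all_goals try omega
      intro x hx
      simp only [List.mem_reverse, List.mem_cons] at hx
      rcases hx with h | h
      · subst h; simpa using hcur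
      · exact hacc x h
    | cons c rest =>
      rw [PySem.Chars.splitOn.go]
      by_cases hp : List.isPrefixOf ['/'] (c :: rest) = true
      · rw [if_pos hp]
        refine ih _ _ _ (by simp at hf ⊢; omega) (by simp) ?_
        intro x hx
        rcases List.mem_cons.mp hx with h | h
        · subst h; simpa using hcur
        · exact hacc x h
      · rw [if_neg hp]
        have hc : c ≠ '/' := by
          intro hc; apply hp; simp [List.isPrefixOf, hc]
        refine ih _ _ _ (by simp at hf ⊢; omega) ?_ hacc
        intro hm
        rcases List.mem_cons.mp hm with h | h
        · exact hc h.symm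
        · exact hcur h

theorem pv_parts_no_slash (fp : List Char) :
    ∀ x ∈ PySem.List.slice (PySem.Chars.splitOn fp ['/']) none (some (-1)), '/' ∉ x := by
  rw [PySem.List.slice_to_neg_one]
  intro x hx
  have hx' : x ∈ PySem.Chars.splitOn fp ['/'] := (List.dropLast_sublist _).subset hx
  unfold PySem.Chars.splitOn at hx'
  exact pv_go_no_slash _ _ _ _ (by omega) (by simp) (by simp) x hx'

-- 'p + "/" is a prefix of a + "/" + s' characterised, when a contains no '/'
theorem pv_prefix_sep (a : List Char) (s p : List Char) (ha : '/' ∉ a) :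
    (p ++ ['/'] <+: a ++ '/' :: s) ↔ (p = a ∨ ∃ q, p = a ++ '/' :: q ∧ q ++ ['/'] <+: s) := by
  induction a generalizing p with
  | nil =>
    cases p with
    | nil => simp [List.cons_prefix_cons]
    | cons c p' =>
      simp only [List.nil_append, List.cons_append, List.cons_prefix_cons]
      constructor
      · rintro ⟨rfl, hpre⟩
        exact Or.inr ⟨p', rfl, hpre⟩
      · rintro (h | ⟨q, hq, hpre⟩)
        · exact absurd h (by simp)
        · injection hq with h1 h2; subst h1; subst h2; exact ⟨rfl, hpre⟩
  | cons b a' ih =>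
    have hb : b ≠ '/' := fun h => ha (h ▸ List.mem_cons_self)
    have ha' : '/' ∉ a' := fun h => ha (List.mem_cons_of_mem _ h)
    cases p with
    | nil =>
      simp only [List.nil_append, List.cons_append, List.cons_prefix_cons]
      constructor
      · rintro ⟨h, -⟩; exact absurd h.symm hb
      · rintro (h | ⟨q, hq, -⟩)
        · exact absurd h (by simp)
        · exact absurd hq (by simp)
    | cons c p' =>
      simp only [List.cons_append, List.cons_prefix_cons]
      rw [ih p' ha']
      constructor
      · rintro ⟨rfl, h | ⟨q, rfl, hpre⟩⟩
        · exact Or.inl (by rw [h])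
        · exact Or.inr ⟨q, rfl, hpre⟩
      · rintro (h | ⟨q, hq, hpre⟩)
        · injection h with h1 h2; subst h1; subst h2; exact ⟨rfl, Or.inl rfl⟩
        · injection hq with h1 h2; subst h1; subst h2; exact ⟨rfl, Or.inr ⟨q, rfl, hpre⟩⟩

-- join over a two-or-more-element list peels its head
theorem pv_join_cons (a y : List Char) (ys : List (List Char)) :
    PySem.Chars.join ['/'] (a :: y :: ys) = a ++ '/' :: PySem.Chars.join ['/'] (y :: ys) := by
  rw [PySem.Chars.join_cons_cons]; simp

-- 'p + "/" prefix of the joined parts' = p is a proper boundary prefix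
theorem pv_prefix_join (parts : List (List Char)) (h : ∀ x ∈ parts, '/' ∉ x) (p : List Char) :
    (p ++ ['/'] <+: PySem.Chars.join ['/'] parts) ↔
      ∃ k, k + 1 < parts.length ∧ p = PySem.Chars.join ['/'] (parts.take (k + 1)) := by
  induction parts generalizing p with
  | nil =>
    simp [PySem.Chars.join_nil, List.prefix_nil]
  | cons a rest ih =>
    cases rest with
    | nil =>
      simp only [PySem.Chars.join_singleton, List.length_cons, List.length_nil]
      constructor
      · intro hpre
        exact absurd (hpre.mem (by simp)) (h a List.mem_cons_self)
      · rintro ⟨k, hk, -⟩; omega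
    | cons b t =>
      have ha : '/' ∉ a := h a List.mem_cons_self
      have hrest : ∀ x ∈ b :: t, '/' ∉ x := fun x hx => h x (List.mem_cons_of_mem _ hx)
      rw [pv_join_cons, pv_prefix_sep a _ p ha]
      constructor
      · rintro (rfl | ⟨q, rfl, hpre⟩)
        · exact ⟨0, by simp, by simp [PySem.Chars.join_singleton]⟩
        · obtain ⟨k, hk, rfl⟩ := (ih hrest q).mp hpre
          refine ⟨k + 1, by simp only [List.length_cons] at hk ⊢; omega, ?_⟩
          rw [show (a :: b :: t).take (k + 1 + 1) = a :: b :: t.take k from rfl,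
            show (b :: t).take (k + 1) = b :: t.take k from rfl, pv_join_cons]
      · rintro ⟨k, hk, rfl⟩
        cases k with
        | zero =>
          exact Or.inl (by rw [show (a :: b :: t).take 1 = [a] from rfl,
            PySem.Chars.join_singleton])
        | succ k' =>
          right
          refine ⟨PySem.Chars.join ['/'] ((b :: t).take (k' + 1)), ?_,
            (ih hrest _).mpr ⟨k', by simp only [List.length_cons] at hk ⊢; omega, rfl⟩⟩
          rw [show (a :: b :: t).take (k' + 1 + 1) = a :: b :: t.take k' from rfl,
            show (b :: t).take (k' + 1) = b :: t.take k' from rfl, pv_join_cons]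

-- membership in a fold of Set.add
theorem pv_mem_foldl_add (l : List Nat) (f : Nat → List Char) (s : PySem.Set (List Char)) (x : List Char) :
    (x ∈ l.foldl (fun s k => PySem.Set.add s (f k)) s) ↔ (x ∈ s ∨ ∃ k ∈ l, x = f k) := by
  induction l generalizing s with
  | nil => simp
  | cons a t ih =>
    rw [List.foldl_cons, ih]
    simp only [PySem.Set.mem_add, List.mem_cons]
    constructor
    · rintro ((h | h) | ⟨k, hk, rfl⟩)
      · exact Or.inl h
      · exact Or.inr ⟨a, Or.inl rfl, h⟩
      · exact Or.inr ⟨k, Or.inr hk, rfl⟩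
    · rintro (h | ⟨k, (rfl | hk), rfl⟩)
      · exact Or.inl (Or.inl h)
      · exact Or.inl (Or.inr rfl)
      · exact Or.inr ⟨k, hk, rfl⟩

-- A's case-1 test for one pattern = membership in B's prefix set
theorem pv_case1 (parts : List (List Char)) (h : ∀ x ∈ parts, '/' ∉ x) (p : List Char) :
    (PySem.Chars.join ['/'] parts == p ||
      PySem.Chars.startswith (PySem.Chars.join ['/'] parts) (p ++ ['/'])) =
    PySem.Set.contains
      ((List.range parts.length).foldl
        (fun s k => PySem.Set.add s (PySem.Chars.join ['/'] (parts.take (k + 1))))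
        (PySem.Set.ofList [PySem.Chars.join ['/'] parts])) p := by
  rw [Bool.eq_iff_iff]
  rw [PySem.Set.contains_iff, pv_mem_foldl_add, PySem.Set.mem_ofList]
  simp only [Bool.or_eq_true, beq_iff_eq, PySem.Chars.startswith_iff, pv_prefix_join parts h,
    List.mem_singleton, List.mem_range]
  constructor
  · rintro (h1 | ⟨k, hk, rfl⟩)
    · exact Or.inl h1.symm
    · exact Or.inr ⟨k, by omega, rfl⟩
  · rintro (h1 | ⟨k, hk, rfl⟩)
    · exact Or.inl h1.symm
    · by_cases hlt : k + 1 < parts.length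
      · exact Or.inr ⟨k, hlt, rfl⟩
      · left
        have : parts.take (k + 1) = parts := List.take_of_length_le (by omega)
        rw [this]
  -- (k + 1 = parts.length gives the whole directory, already present as file_dir)

-- membership in the lowered component set = A's inner scan
theorem pv_set_scan (parts : List (List Char)) (p : List Char) :
    PySem.Set.contains (PySem.Set.ofList (parts.map PySem.Chars.lower)) (PySem.Chars.lower p)
      = parts.any (fun part => PySem.Chars.lower part == PySem.Chars.lower p) := by
  rw [Bool.eq_iff_iff]
  rw [PySem.Set.contains_iff, PySem.Set.mem_ofList, List.mem_map, List.any_eq_true]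
  constructor
  · rintro ⟨part, hmem, heq⟩; exact ⟨part, hmem, by simp [heq]⟩
  · rintro ⟨part, hmem, heq⟩; exact ⟨part, hmem, by simpa using heq⟩

-- A's early-return loop is an 'any' of the disjunction of its two tests
theorem pv_loop_eq (fp fd : List Char) (ps : List (List Char)) :
    pvA_loop fp fd ps =
      ps.any (fun p => (fd == p || PySem.Chars.startswith fd (p ++ ['/'])) ||
        (PySem.List.slice (PySem.Chars.splitOn fp ['/']) none (some (-1))).any
          (fun part => PySem.Chars.lower part == PySem.Chars.lower p)) := by
  induction ps with
  | nil => rfl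
  | cons p rest ih =>
    rw [pvA_loop, List.any_cons, ← ih]
    cases h1 : (fd == p || PySem.Chars.startswith fd (p ++ ['/'])) <;>
      cases h2 : ((PySem.List.slice (PySem.Chars.splitOn fp ['/']) none (some (-1))).any
        (fun part => PySem.Chars.lower part == PySem.Chars.lower p)) <;>
      simp [h2]

-- ===== VERDICT =====
theorem is_file_in_excluded_directory_py_spec : Claim_equal_is_file_in_excluded_directory_py := by
  intro file_path exclude_patterns _
  unfold Spec_is_file_in_excluded_directory_py
  unfold is_file_in_excluded_directory_py is_file_in_excluded_directory_py_alt
  simp only [pv_file_dir_eq, pv_loop_eq, List.any_map, Function.comp_def]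
  have hparts := pv_parts_no_slash file_path.toList
  congr 1
  funext p
  rw [pv_case1 _ hparts, pv_set_scan]
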